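-- pv_equiv track=rewrite | github.com/eunseo-kim/Algorithm | programmers/2019 카카오 개발자 겨울 인턴십/호텔 방 배정.py | solution
-- ===== SOURCE A (Python) =====
-- def solution(k, room_number):
--     def find_empty_room(room):  # 약간 union-find에서 경로 단축과 비슷한 문제
--         if room not in rooms:
--             rooms[room] = room + 1
--             return room
--
--         empty_room = find_empty_room(rooms[room])
--         rooms[room] = empty_room + 1
--         return empty_room
--
--     answer = []
--     rooms = {}
--
--     for room in room_number:
--         empty_room = find_empty_room(room)
--         answer.append(empty_room)
--
--     return answer
-- ===== SOURCE B (Python) =====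
-- def solution(k, room_number):
--     rooms = {}
--     answer = []
--     for room in room_number:
--         # walk the chain iteratively, collecting the visited occupied rooms
--         path = []
--         while room in rooms:
--             path.append(room)
--             room = rooms[room]
--         empty_room = room
--         rooms[empty_room] = empty_room + 1
--         # compress the whole path (deepest node first) to point past the assigned room
--         for node in reversed(path):
--             rooms[node] = empty_room + 1
--         answer.append(empty_room)
--     return answer
-- ===== Notes on version B (the rewrite author's own statement) =====
-- stated objective: alternative
-- what changed: Replaces A's recursive find_empty_room (path compression on the unwind of the call stack) with an iterative while-loop that collects the visited chain into an explicit path list and then compresses it, avoiding Python's recursion limit on long chains.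
import Mathlib
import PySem

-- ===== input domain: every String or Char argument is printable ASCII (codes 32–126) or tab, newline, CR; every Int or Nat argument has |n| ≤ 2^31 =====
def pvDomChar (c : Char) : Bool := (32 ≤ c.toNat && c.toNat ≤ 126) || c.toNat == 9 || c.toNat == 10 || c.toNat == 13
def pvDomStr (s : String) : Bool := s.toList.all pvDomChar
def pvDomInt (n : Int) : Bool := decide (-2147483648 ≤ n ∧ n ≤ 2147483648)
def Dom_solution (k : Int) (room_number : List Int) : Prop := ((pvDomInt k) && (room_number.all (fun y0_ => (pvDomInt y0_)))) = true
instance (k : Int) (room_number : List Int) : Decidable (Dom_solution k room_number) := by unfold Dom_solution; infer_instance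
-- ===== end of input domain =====

-- B changes the decomposition only (iterative walk + explicit path list instead of recursion); same cost, no speed claim.

-- ===== PORT A =====
-- find_empty_room, recursive; the Nat fuel (rooms.size+1 at each top-level call) is only a
-- totality guard: the chain of rooms[...] values is strictly increasing (proved below), so the
-- fuel is never exhausted on any input.
def findRoomA : Nat → PySem.Dict Int Int → Int → Int × PySem.Dict Int Int
  | 0, d, room => (room, d)  -- unreachable fuel guard
  | n+1, d, room =>
    if d.contains room = false then
      (room, d.insert room (room + 1))
    else
      let r := findRoomA n d (d.getD room 0)
      (r.1, r.2.insert room (r.1 + 1))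

def solution (k : Int) (room_number : List Int) : List Int :=
  (room_number.foldl
    (fun (st : List Int × PySem.Dict Int Int) room =>
      let r := findRoomA (st.2.size + 1) st.2 room
      (st.1 ++ [r.1], r.2))
    ([], PySem.Dict.empty)).1

-- ===== PORT B =====
-- the while-loop of Source B: follow the chain, appending each occupied room to path
def walkB : Nat → PySem.Dict Int Int → Int → List Int → List Int × Int
  | 0, _, room, path => (path, room)  -- unreachable fuel guard
  | n+1, d, room, path =>
    if d.contains room then
      walkB n d (d.getD room 0) (path ++ [room])
    else
      (path, room)

def findRoomB (d : PySem.Dict Int Int) (room : Int) : Int × PySem.Dict Int Int :=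
  let w := walkB (d.size + 1) d room []
  let e := w.2
  (e, w.1.reverse.foldl (fun d x => d.insert x (e + 1)) (d.insert e (e + 1)))

def solution_alt (k : Int) (room_number : List Int) : List Int :=
  (room_number.foldl
    (fun (st : List Int × PySem.Dict Int Int) room =>
      let r := findRoomB st.2 room
      (st.1 ++ [r.1], r.2))
    ([], PySem.Dict.empty)).1

-- ===== PRECONDITION & SPEC =====
def Spec_solution (k : Int) (room_number : List Int) (out : List Int) : Prop := out = solution_alt k room_number
instance (k : Int) (room_number : List Int) (out : List Int) : Decidable (Spec_solution k room_number out) := by unfold Spec_solution; infer_instance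

-- ===== CLAIM (what is proved, stated in full; the proofs are below) =====
def Claim_equal_solution : Prop := ∀ (k : Int) (room_number : List Int), Dom_solution k room_number → Spec_solution k room_number (solution k room_number)

-- ===== LEMMAS AND PROOFS =====

-- invariant: every stored room points strictly past itself
def RInv (d : PySem.Dict Int Int) : Prop := ∀ a b : Int, d.get? a = some b → a < b

theorem rinv_empty : RInv (PySem.Dict.empty : PySem.Dict Int Int) := by
  intro a b h; simp [PySem.Dict.get?_empty] at h

theorem rinv_insert {d : PySem.Dict Int Int} {a b : Int} (hd : RInv d) (hab : a < b) :
    RInv (d.insert a b) := by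
  intro x y h
  rw [PySem.Dict.get?_insert] at h
  split at h
  · cases h; omega
  · exact hd x y h

theorem rinv_foldl (l : List Int) (e : Int) (d : PySem.Dict Int Int) (hd : RInv d)
    (hl : ∀ x ∈ l, x ≤ e) :
    RInv (l.foldl (fun d x => d.insert x (e + 1)) d) := by
  induction l generalizing d with
  | nil => exact hd
  | cons x xs ih =>
    simp only [List.foldl_cons]
    refine ih _ (rinv_insert hd ?_) (fun y hy => hl y (by simp [hy]))
    have := hl x (by simp); omega

theorem walkB_append (n : Nat) : ∀ (d : PySem.Dict Int Int) (r : Int) (acc : List Int),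
    walkB n d r acc = (acc ++ (walkB n d r []).1, (walkB n d r []).2) := by
  induction n with
  | zero => intro d r acc; simp [walkB]
  | succ n ih =>
    intro d r acc
    simp only [walkB]
    by_cases h : d.contains r
    · simp only [h, if_true]
      rw [ih d (d.getD r 0) (acc ++ [r]), ih d (d.getD r 0) ([] ++ [r])]
      simp
    · simp [h]

-- the heart: with enough fuel (more than the number of keys ≥ r), the recursive A
-- equals the walk-then-compress B, the reached room bounds the whole path, and A never
-- exhausts its fuel.
theorem core (n : Nat) : ∀ (d : PySem.Dict Int Int) (r : Int), RInv d →
    (d.keys.filter (fun x => decide (r ≤ x))).length < n →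
    r ≤ (walkB n d r []).2 ∧
    (∀ x ∈ (walkB n d r []).1, x ≤ (walkB n d r []).2) ∧
    findRoomA n d r =
      ((walkB n d r []).2,
        (walkB n d r []).1.reverse.foldl
          (fun dd x => dd.insert x ((walkB n d r []).2 + 1))
          (d.insert (walkB n d r []).2 ((walkB n d r []).2 + 1))) := by
  induction n with
  | zero => intro d r _ h; omega
  | succ n ih =>
    intro d r hinv hbound
    by_cases hc : d.contains r
    · -- occupied: step to v := d[r]
      obtain ⟨v, hv⟩ : ∃ v, d.get? r = some v := by
        have := PySem.Dict.contains_eq_isSome_get? d r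
        rw [hc] at this
        exact Option.isSome_iff_exists.mp this.symm
      have hgetD : d.getD r 0 = v := PySem.Dict.getD_of_get?_eq_some d 0 hv
      have hrv : r < v := hinv r v hv
      have hrk : r ∈ d.keys := (PySem.Dict.contains_iff_mem_keys d r).mp hc
      -- the count of keys ≥ v is strictly smaller than the count of keys ≥ r
      have hsub : d.keys.filter (fun x => decide (v ≤ x)) =
          (d.keys.filter (fun x => decide (r ≤ x))).filter (fun x => decide (v ≤ x)) := by
        rw [List.filter_filter]
        apply List.filter_congr
        intro x _
        by_cases hvx : v ≤ x
        · have : r ≤ x := by omega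
          simp [hvx, this]
        · simp [hvx]
      have hlt : (d.keys.filter (fun x => decide (v ≤ x))).length <
          (d.keys.filter (fun x => decide (r ≤ x))).length := by
        rw [hsub]
        apply List.length_filter_lt_length_iff_exists.mpr
        refine ⟨r, ?_, by simp; omega⟩
        simp only [List.mem_filter]
        exact ⟨hrk, by simp⟩
      have hb' : (d.keys.filter (fun x => decide (v ≤ x))).length < n := by omega
      obtain ⟨h1, h2, h3⟩ := ih d v hinv hb'
      have hw : walkB (n+1) d r [] = ([r] ++ (walkB n d v []).1, (walkB n d v []).2) := by
        simp only [walkB, hc, if_true, hgetD]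
        rw [walkB_append n d v ([] ++ [r])]
        simp
      constructor
      · rw [hw]; simp only; omega
      constructor
      · rw [hw]
        intro x hx
        simp only [List.cons_append, List.nil_append, List.mem_cons] at hx
        rcases hx with rfl | hx
        · omega
        · exact h2 x hx
      · rw [hw]
        simp only [findRoomA, hc, hgetD, h3]
        simp [List.foldl_append]
    · -- free room reached immediately
      have hw : walkB (n+1) d r [] = ([], r) := by simp [walkB, hc]
      refine ⟨by rw [hw], by rw [hw]; simp, ?_⟩
      rw [hw]
      simp [findRoomA, hc]

theorem findRoom_eq (d : PySem.Dict Int Int) (r : Int) (hinv : RInv d) :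
    findRoomA (d.size + 1) d r = findRoomB d r := by
  have hb : (d.keys.filter (fun x => decide (r ≤ x))).length < d.size + 1 := by
    have h1 : (d.keys.filter (fun x => decide (r ≤ x))).length ≤ d.keys.length :=
      List.length_filter_le _ _
    have h2 : d.keys.length = d.size := by
      simp [PySem.Dict.keys, PySem.Dict.size]
    omega
  obtain ⟨_, _, h3⟩ := core (d.size + 1) d r hinv hb
  rw [h3]; rfl

theorem findRoom_inv (d : PySem.Dict Int Int) (r : Int) (hinv : RInv d) :
    RInv (findRoomB d r).2 := by
  have hb : (d.keys.filter (fun x => decide (r ≤ x))).length < d.size + 1 := by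
    have h1 : (d.keys.filter (fun x => decide (r ≤ x))).length ≤ d.keys.length :=
      List.length_filter_le _ _
    have h2 : d.keys.length = d.size := by
      simp [PySem.Dict.keys, PySem.Dict.size]
    omega
  obtain ⟨_, h2, _⟩ := core (d.size + 1) d r hinv hb
  show RInv (((walkB (d.size+1) d r []).1.reverse.foldl _ _))
  apply rinv_foldl
  · exact rinv_insert hinv (by omega)
  · intro x hx
    exact h2 x (List.mem_reverse.mp hx)

theorem driver_eq (l : List Int) : ∀ (st : List Int × PySem.Dict Int Int), RInv st.2 →
    l.foldl (fun (st : List Int × PySem.Dict Int Int) room =>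
        let r := findRoomA (st.2.size + 1) st.2 room
        (st.1 ++ [r.1], r.2)) st =
    l.foldl (fun (st : List Int × PySem.Dict Int Int) room =>
        let r := findRoomB st.2 room
        (st.1 ++ [r.1], r.2)) st := by
  induction l with
  | nil => intro st _; rfl
  | cons x xs ih =>
    intro st hinv
    simp only [List.foldl_cons, findRoom_eq st.2 x hinv]
    exact ih _ (findRoom_inv st.2 x hinv)

-- ===== VERDICT (by name: the statement is the Claim_ definition above) =====
theorem solution_spec : Claim_equal_solution := by
  intro k room_number _
  show solution k room_number = solution_alt k room_number
  unfold solution solution_alt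
  rw [driver_eq room_number ([], PySem.Dict.empty) rinv_empty]
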